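-- pv_equiv track=rewrite | github.com/TwipTwip/BestBuy | promotions.py | apply_promotion
-- ===== SOURCE A (Python) =====
-- def apply_promotion(price, quantity):
--     discounted_price = 0
--     subtract_discount = 0
--     if quantity >= 3:
--         num_free_items = quantity // 3
--         for times in range(num_free_items):
--             subtract_discount += price
--         for items in range(quantity):
--             discounted_price += price
--         discounted_price = discounted_price - subtract_discount
--         return discounted_price
--     else:
--         total = 0
--         for item in range(quantity):
--             total += price
--         return total
-- ===== SOURCE B (Python) =====
-- def apply_promotion(price, quantity):
--     if quantity >= 3:
--         return price * quantity - price * (quantity // 3)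
--     return price * quantity if quantity > 0 else 0
-- ===== Notes on version B (the rewrite author's own statement) =====
-- stated objective: faster
-- what changed: Replaced the per-item accumulation loops with closed-form multiplication: price*quantity - price*(quantity//3).
import Mathlib
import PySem

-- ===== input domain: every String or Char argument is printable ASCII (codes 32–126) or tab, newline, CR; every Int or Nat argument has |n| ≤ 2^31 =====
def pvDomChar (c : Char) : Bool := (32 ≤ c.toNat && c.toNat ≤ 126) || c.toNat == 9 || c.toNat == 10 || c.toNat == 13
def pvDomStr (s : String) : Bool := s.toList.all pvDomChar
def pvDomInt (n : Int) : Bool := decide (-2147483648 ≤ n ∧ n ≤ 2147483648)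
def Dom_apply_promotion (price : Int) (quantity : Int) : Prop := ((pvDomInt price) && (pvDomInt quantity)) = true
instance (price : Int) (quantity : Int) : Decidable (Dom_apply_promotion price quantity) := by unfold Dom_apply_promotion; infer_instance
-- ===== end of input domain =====

-- ===== PORT A =====
-- B replaces A's per-item accumulation loops with closed-form multiplication (objective: faster).
def apply_promotion (price : Int) (quantity : Int) : Int :=
  if quantity ≥ 3 then
    let num_free_items := PySem.Int.floordiv quantity 3
    let subtract_discount := (PySem.List.pyRange 0 num_free_items 1).foldl (fun acc _ => acc + price) 0
    let discounted_price := (PySem.List.pyRange 0 quantity 1).foldl (fun acc _ => acc + price) 0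
    discounted_price - subtract_discount
  else
    (PySem.List.pyRange 0 quantity 1).foldl (fun acc _ => acc + price) 0

-- ===== PORT B =====
def apply_promotion_alt (price : Int) (quantity : Int) : Int :=
  if quantity ≥ 3 then price * quantity - price * (PySem.Int.floordiv quantity 3)
  else if quantity > 0 then price * quantity else 0

-- ===== PRECONDITION & SPEC =====
def Spec_apply_promotion (price : Int) (quantity : Int) (out : Int) : Prop := out = apply_promotion_alt price quantity
instance (price : Int) (quantity : Int) (out : Int) : Decidable (Spec_apply_promotion price quantity out) := by unfold Spec_apply_promotion; infer_instance

-- ===== CLAIM (what is proved, stated in full; the proofs are below) =====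
def Claim_equal_apply_promotion : Prop := ∀ (price : Int) (quantity : Int), Dom_apply_promotion price quantity → Spec_apply_promotion price quantity (apply_promotion price quantity)

-- ===== LEMMAS AND PROOFS =====

-- ===== VERDICT (by name: the statement is the Claim_ definition above) =====
theorem pv_loop_sum (price n : Int) :
    (PySem.List.pyRange 0 n 1).foldl (fun acc _ => acc + price) 0 = n.toNat * price := by
  rw [PySem.List.foldl_add (g := fun _ => price)]
  simp [List.map_const', List.sum_replicate, PySem.List.length_pyRange_one, mul_comm]

theorem apply_promotion_spec : Claim_equal_apply_promotion := by
  intro price quantity _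
  unfold Spec_apply_promotion apply_promotion apply_promotion_alt
  by_cases h : quantity ≥ 3
  · simp only [h, if_pos, pv_loop_sum]
    have h3 : PySem.Int.floordiv quantity 3 = quantity / 3 := by
      simp [PySem.Int.floordiv, Int.fdiv_eq_ediv_of_nonneg _ (by omega : (0:Int) ≤ 3)]
    have hq : (quantity.toNat : Int) = quantity := by omega
    have hd : ((quantity / 3).toNat : Int) = quantity / 3 := by
      have : 0 ≤ quantity / 3 := by positivity
      omega
    rw [h3, hq, hd]
    ring
  · rw [if_neg h, if_neg h, pv_loop_sum]
    by_cases hp : quantity > 0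
    · rw [if_pos hp]
      have : (quantity.toNat : Int) = quantity := by omega
      rw [this, mul_comm]
    · rw [if_neg hp]
      have : quantity.toNat = 0 := by omega
      simp [this]
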